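-- pv_equiv track=rewrite | github.com/userssss/galaxy | lib/galaxy/tool_shed/util/shed_util_common.py | get_next_prior_import_or_install_required_dict_entry
-- ===== SOURCE A (Python) =====
-- def get_next_prior_import_or_install_required_dict_entry(prior_required_dict, processed_tsr_ids):
--     """
--     This method is used in the Tool Shed when exporting a repository and its dependencies, and in Galaxy
--     when a repository and its dependencies are being installed.  The order in which the prior_required_dict
--     is processed is critical in order to ensure that the ultimate repository import or installation order is
--     correctly defined.  This method determines the next key / value pair from the received prior_required_dict
--     that should be processed.
--     """
--     # Return the first key / value pair that is not yet processed and whose value is an empty list.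
--     for key, value in prior_required_dict.items():
--         if key in processed_tsr_ids:
--             continue
--         if not value:
--             return key
--     # Return the first key / value pair that is not yet processed and whose ids in value are all included
--     # in processed_tsr_ids.
--     for key, value in prior_required_dict.items():
--         if key in processed_tsr_ids:
--             continue
--         all_contained = True
--         for required_repository_id in value:
--             if required_repository_id not in processed_tsr_ids:
--                 all_contained = False
--                 break
--         if all_contained:
--             return key
--     # Return the first key / value pair that is not yet processed.  Hopefully this is all that is necessary
--     # at this point.
--     for key, value in prior_required_dict.items():
--         if key in processed_tsr_ids:
--             continue
--         return key
-- ===== SOURCE B (Python) =====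
-- def get_next_prior_import_or_install_required_dict_entry(prior_required_dict, processed_tsr_ids):
--     # Single pass: remember the first unprocessed key in each priority class,
--     # then return by priority: empty value, all-contained value, any.
--     first_empty = None
--     first_contained = None
--     first_any = None
--     for key, value in prior_required_dict.items():
--         if key in processed_tsr_ids:
--             continue
--         if first_empty is None and not value:
--             first_empty = key
--         if first_contained is None and all(r in processed_tsr_ids for r in value):
--             first_contained = key
--         if first_any is None:
--             first_any = key
--     if first_empty is not None:
--         return first_empty
--     if first_contained is not None:
--         return first_contained
--     return first_any
-- ===== Notes on version B (the rewrite author's own statement) =====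
-- stated objective: alternative
-- what changed: Replaces A's three sequential full scans of the dict with one pass that keeps the first unprocessed key of each priority class (empty value / all-contained value / any) and picks by priority afterwards; same asymptotic cost, trading repeated traversal for three candidate slots.
import Mathlib
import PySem

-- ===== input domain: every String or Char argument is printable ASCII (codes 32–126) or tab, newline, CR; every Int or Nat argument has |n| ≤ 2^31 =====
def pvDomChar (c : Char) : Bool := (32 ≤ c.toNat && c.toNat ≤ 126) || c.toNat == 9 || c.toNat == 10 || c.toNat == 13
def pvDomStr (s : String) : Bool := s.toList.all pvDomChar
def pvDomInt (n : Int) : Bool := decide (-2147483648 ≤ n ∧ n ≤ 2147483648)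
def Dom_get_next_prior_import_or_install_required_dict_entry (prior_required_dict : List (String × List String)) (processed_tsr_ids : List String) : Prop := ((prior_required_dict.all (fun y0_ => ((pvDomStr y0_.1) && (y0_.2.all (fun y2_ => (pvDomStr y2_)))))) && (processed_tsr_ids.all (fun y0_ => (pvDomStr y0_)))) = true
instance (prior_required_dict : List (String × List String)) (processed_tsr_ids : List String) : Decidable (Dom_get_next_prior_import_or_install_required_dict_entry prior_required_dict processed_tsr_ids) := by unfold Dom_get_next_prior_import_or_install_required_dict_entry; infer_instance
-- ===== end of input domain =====

-- B replaces A's three sequential scans of the dict with ONE pass that records the first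
-- unprocessed key of each priority class (empty / all-contained / any) and picks by priority.


-- ===== PORT A =====
-- first loop of A: first unprocessed key whose value is empty
def pvLoop1 (l : List (String × List String)) (p : List String) : Option String :=
  match l with
  | [] => none
  | (key, value) :: rest =>
    if p.contains key then pvLoop1 rest p
    else if value.isEmpty then some key
    else pvLoop1 rest p

-- A's inner loop: all ids in value are in processed_tsr_ids (with break)
def pvAllContained (value : List String) (p : List String) : Bool :=
  match value with
  | [] => true
  | r :: rest => if !(p.contains r) then false else pvAllContained rest p

-- second loop of A
def pvLoop2 (l : List (String × List String)) (p : List String) : Option String :=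
  match l with
  | [] => none
  | (key, value) :: rest =>
    if p.contains key then pvLoop2 rest p
    else if pvAllContained value p then some key
    else pvLoop2 rest p

-- third loop of A: first unprocessed key
def pvLoop3 (l : List (String × List String)) (p : List String) : Option String :=
  match l with
  | [] => none
  | (key, _) :: rest =>
    if p.contains key then pvLoop3 rest p
    else some key

def get_next_prior_import_or_install_required_dict_entry (prior_required_dict : List (String × List String)) (processed_tsr_ids : List String) : Option String :=
  match pvLoop1 prior_required_dict processed_tsr_ids with
  | some k => some k
  | none =>
    match pvLoop2 prior_required_dict processed_tsr_ids with
    | some k => some k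
    | none => pvLoop3 prior_required_dict processed_tsr_ids

-- ===== PORT B =====
-- single-pass step: update the three first-match candidates for one entry
def pvStep (p : List String) (st : Option String × Option String × Option String)
    (kv : String × List String) : Option String × Option String × Option String :=
  if p.contains kv.1 then st
  else
    ( (if st.1.isNone && kv.2.isEmpty then some kv.1 else st.1),
      (if st.2.1.isNone && kv.2.all p.contains then some kv.1 else st.2.1),
      (if st.2.2.isNone then some kv.1 else st.2.2) )

def get_next_prior_import_or_install_required_dict_entry_alt (prior_required_dict : List (String × List String)) (processed_tsr_ids : List String) : Option String :=
  let st := prior_required_dict.foldl (pvStep processed_tsr_ids) (none, none, none)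
  match st.1 with
  | some k => some k
  | none =>
    match st.2.1 with
    | some k => some k
    | none => st.2.2

-- ===== PRECONDITION & SPEC =====
def Spec_get_next_prior_import_or_install_required_dict_entry (prior_required_dict : List (String × List String)) (processed_tsr_ids : List String) (out : Option String) : Prop := out = get_next_prior_import_or_install_required_dict_entry_alt prior_required_dict processed_tsr_ids
instance (prior_required_dict : List (String × List String)) (processed_tsr_ids : List String) (out : Option String) : Decidable (Spec_get_next_prior_import_or_install_required_dict_entry prior_required_dict processed_tsr_ids out) := by unfold Spec_get_next_prior_import_or_install_required_dict_entry; infer_instance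

-- ===== CLAIM (what is proved, stated in full; the proofs are below) =====
def Claim_equal_get_next_prior_import_or_install_required_dict_entry : Prop := ∀ (prior_required_dict : List (String × List String)) (processed_tsr_ids : List String), Dom_get_next_prior_import_or_install_required_dict_entry prior_required_dict processed_tsr_ids → Spec_get_next_prior_import_or_install_required_dict_entry prior_required_dict processed_tsr_ids (get_next_prior_import_or_install_required_dict_entry prior_required_dict processed_tsr_ids)

-- ===== LEMMAS AND PROOFS =====

-- A's break-out inner loop is List.all membership
theorem pvAllContained_eq_all (value p : List String) :
    pvAllContained value p = value.all p.contains := by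
  induction value with
  | nil => rfl
  | cons r rest ih => simp [pvAllContained, ih]

-- fold invariant: each component of B's state is "candidate, else first match in the rest"
theorem pvStep_foldl_inv (p : List String) (l : List (String × List String))
    (e c a : Option String) :
    l.foldl (pvStep p) (e, c, a) =
      ( (match e with | some k => some k | none => pvLoop1 l p),
        (match c with | some k => some k | none => pvLoop2 l p),
        (match a with | some k => some k | none => pvLoop3 l p) ) := by
  induction l generalizing e c a with
  | nil => cases e <;> cases c <;> cases a <;> simp [pvLoop1, pvLoop2, pvLoop3]
  | cons kv rest ih =>
    obtain ⟨key, value⟩ := kv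
    simp only [List.foldl_cons, pvStep]
    by_cases hp : key ∈ p
    · rw [if_pos (by simpa using hp), ih]
      simp [pvLoop1, pvLoop2, pvLoop3, hp]
    · rw [if_neg (by simpa using hp), ih]
      cases e <;> cases c <;> cases a <;>
        simp [pvLoop1, pvLoop2, pvLoop3, hp, pvAllContained_eq_all] <;>
        split_ifs <;> simp_all

-- ===== VERDICT (by name: the statement is the Claim_ definition above) =====
theorem get_next_prior_import_or_install_required_dict_entry_spec : Claim_equal_get_next_prior_import_or_install_required_dict_entry := by
  intro d p _
  unfold Spec_get_next_prior_import_or_install_required_dict_entry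
  unfold get_next_prior_import_or_install_required_dict_entry
  unfold get_next_prior_import_or_install_required_dict_entry_alt
  rw [pvStep_foldl_inv]
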